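-- pv_equiv track=rewrite | github.com/hzratali/DSA-Problems | 0920-number-of-music-playlists/0920-number-of-music-playlists.py | numMusicPlaylists
-- ===== SOURCE A (Python) =====
-- def numMusicPlaylists(n: int, goal: int, k: int) -> int:
--     mod = 10**9+7
--     dp = [[-1] * (101) for _ in range(101)]
--     def solve(usedSong, currL):
--         if currL == goal: return usedSong == n
--         if dp[usedSong][currL] != -1: return dp[usedSong][currL]
--         usedSongPlay = (solve(usedSong, currL+1)) * max(0, usedSong-k) %mod
--         newSongPlay = (solve(usedSong+1, currL+1) * (n-usedSong)) % mod
--         total = (usedSongPlay + newSongPlay) % mod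
--         dp[usedSong][currL] = total%mod
--         return dp[usedSong][currL]
--     return solve(0, 0)
-- ===== SOURCE B (Python) =====
-- def numMusicPlaylists(n: int, goal: int, k: int) -> int:
--     mod = 10**9 + 7
--     # bottom-up DP: row[u] = number of ways to extend a playlist of the current
--     # length that already uses u distinct songs into a full valid playlist
--     row = [1 if u == n else 0 for u in range(goal + 1)]
--     for length in range(goal - 1, -1, -1):
--         row = [(row[u] * max(0, u - k) + row[u + 1] * (n - u)) % mod
--                for u in range(length + 1)]
--     return row[0]
-- ===== Notes on version B (the rewrite author's own statement) =====
-- stated objective: alternative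
-- what changed: Replaced the top-down memoized recursion over a fixed 101x101 sentinel table by a bottom-up DP that keeps a single rolling row per remaining length, built with list comprehensions and no recursion.
-- outside the precondition, e.g. on numMusicPlaylists(0, 0, 0): A returns True, B returns 1
import Mathlib
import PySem

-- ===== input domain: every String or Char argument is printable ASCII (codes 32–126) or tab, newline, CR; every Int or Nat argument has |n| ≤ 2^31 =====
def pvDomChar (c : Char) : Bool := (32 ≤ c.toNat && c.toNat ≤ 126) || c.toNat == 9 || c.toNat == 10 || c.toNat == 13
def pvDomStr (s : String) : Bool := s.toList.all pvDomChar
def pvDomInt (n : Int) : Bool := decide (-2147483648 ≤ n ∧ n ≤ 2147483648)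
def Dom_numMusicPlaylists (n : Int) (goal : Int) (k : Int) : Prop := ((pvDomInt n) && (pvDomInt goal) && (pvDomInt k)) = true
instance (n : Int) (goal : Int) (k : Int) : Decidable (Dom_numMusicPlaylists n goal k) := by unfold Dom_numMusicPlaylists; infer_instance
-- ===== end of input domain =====

-- B replaces A's memoized top-down recursion by a bottom-up rolling-row DP (one list
-- comprehension per level); equivalence of the RETURN value is proved on Pre_.

-- ===== PORT A =====
-- A's memo table dp (a 101×101 list of lists initialised to -1) is ported literally as
-- List (List Int) with PySem.List.pyGetD / pySetD; fuel makes the recursion structural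
-- (inside Pre_ the fuel goal.toNat is never exhausted, exactly as Python's recursion).
def pvLookup (dp : List (List Int)) (u : Int) (c : Int) : Int :=
  PySem.List.pyGetD (PySem.List.pyGetD dp u []) c (-1)

def pvSolveA (n : Int) (goal : Int) (k : Int) (m : Int) :
    Nat → Int → Int → List (List Int) → Int × List (List Int)
  | fuel, usedSong, currL, dp =>
    if currL = goal then ((if usedSong = n then 1 else 0), dp)
    else if pvLookup dp usedSong currL ≠ -1 then (pvLookup dp usedSong currL, dp)
    else
      match fuel with
      | 0 => (0, dp)  -- fuel guard only; unreachable under Pre_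
      | fuel + 1 =>
        let r1 := pvSolveA n goal k m fuel usedSong (currL + 1) dp
        let usedSongPlay := PySem.Int.mod (r1.1 * max 0 (usedSong - k)) m
        let r2 := pvSolveA n goal k m fuel (usedSong + 1) (currL + 1) r1.2
        let newSongPlay := PySem.Int.mod (r2.1 * (n - usedSong)) m
        let total := PySem.Int.mod (usedSongPlay + newSongPlay) m
        let stored := PySem.Int.mod total m
        let dp' := PySem.List.pySetD r2.2 usedSong
          (PySem.List.pySetD (PySem.List.pyGetD r2.2 usedSong []) currL stored)
        (pvLookup dp' usedSong currL, dp')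

def numMusicPlaylists (n : Int) (goal : Int) (k : Int) : Int :=
  let m : Int := 10 ^ 9 + 7
  let dp0 : List (List Int) := List.replicate 101 (List.replicate 101 (-1))
  (pvSolveA n goal k m goal.toNat 0 0 dp0).1

-- ===== PORT B =====
def numMusicPlaylists_alt (n : Int) (goal : Int) (k : Int) : Int :=
  let m : Int := 10 ^ 9 + 7
  let row0 := (PySem.List.pyRange 0 (goal + 1) 1).map (fun u => if u = n then (1 : Int) else 0)
  let row := (PySem.List.pyRange (goal - 1) (-1) (-1)).foldl
    (fun row L => (PySem.List.pyRange 0 (L + 1) 1).map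
      (fun u => PySem.Int.mod
        (PySem.List.pyGetD row u 0 * max 0 (u - k) + PySem.List.pyGetD row (u + 1) 0 * (n - u)) m))
    row0
  PySem.List.pyGetD row 0 0

-- ===== PRECONDITION & SPEC =====
-- A raises for goal < 0 and goal ≥ 102 (IndexError on its fixed 101×101 memo table), and
-- Pre_ also excludes goal = 0, where A returns the bool usedSong == n instead of an int
-- (B returns the corresponding int 0/1 there); otherwise Pre_ admits every input A returns on.
def Pre_numMusicPlaylists (n : Int) (goal : Int) (k : Int) : Prop := 1 ≤ goal ∧ goal ≤ 101
instance (n : Int) (goal : Int) (k : Int) : Decidable (Pre_numMusicPlaylists n goal k) := by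
  unfold Pre_numMusicPlaylists; infer_instance
def pvWitness_numMusicPlaylists : Int × Int × Int := (2, 3, 1)

def Spec_numMusicPlaylists (n : Int) (goal : Int) (k : Int) (out : Int) : Prop := out = numMusicPlaylists_alt n goal k
instance (n : Int) (goal : Int) (k : Int) (out : Int) : Decidable (Spec_numMusicPlaylists n goal k out) := by unfold Spec_numMusicPlaylists; infer_instance

-- ===== CLAIM (what is proved, stated in full; the proofs are below) =====
def Claim_equal_numMusicPlaylists : Prop := ∀ (n : Int) (goal : Int) (k : Int), Dom_numMusicPlaylists n goal k → Pre_numMusicPlaylists n goal k → Spec_numMusicPlaylists n goal k (numMusicPlaylists n goal k)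

-- ===== LEMMAS AND PROOFS =====

-- the recurrence value, indexed by remaining length r = goal - currL
def pvG (n : Int) (k : Int) (m : Int) : Nat → Int → Int
  | 0, u => if u = n then 1 else 0
  | r + 1, u =>
      PySem.Int.mod
        (PySem.Int.mod (pvG n k m r u * max 0 (u - k)) m +
         PySem.Int.mod (pvG n k m r (u + 1) * (n - u)) m) m

lemma pvMod_idem (x m : Int) (hm : 0 < m) :
    PySem.Int.mod (PySem.Int.mod x m) m = PySem.Int.mod x m := by
  rw [PySem.Int.mod_eq_emod_of_pos hm, PySem.Int.mod_eq_emod_of_pos hm,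
      Int.emod_emod_of_dvd _ dvd_rfl]

lemma pvG_step (n k m : Int) (hm : 0 < m) (r : Nat) (u : Int) :
    PySem.Int.mod (pvG n k m r u * max 0 (u - k) + pvG n k m r (u + 1) * (n - u)) m
      = pvG n k m (r + 1) u := by
  simp only [pvG, PySem.Int.mod_eq_emod_of_pos hm]
  rw [Int.add_emod]

def pvValid (n goal k m : Int) (dp : List (List Int)) : Prop :=
  dp.length = 101 ∧ (∀ row ∈ dp, row.length = 101) ∧
  ∀ u c : Nat, (c : Int) < goal →
    pvLookup dp u c = -1 ∨ pvLookup dp u c = pvG n k m (goal - (c : Int)).toNat (u : Int)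

lemma pvLookup_natCast (dp : List (List Int)) (u c : Nat) :
    pvLookup dp u c = (dp.getD u []).getD c (-1) := by
  simp [pvLookup]

lemma pvLookup_natCast' (dp : List (List Int)) (u c : Nat) :
    pvLookup dp ((u : Nat) : Int) ((c : Nat) : Int) = pvLookup dp u c := rfl

lemma pvLookup_set (dp : List (List Int)) (U C : Nat) (v : Int) (u c : Nat)
    (hU : U < dp.length) (hC : C < (dp.getD U []).length) :
    pvLookup (dp.set U ((dp.getD U []).set C v)) u c
      = if u = U ∧ c = C then v else pvLookup dp u c := by
  have hC' : C < (dp[U]?.getD []).length := by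
    rw [← List.getD_eq_getElem?_getD]; exact hC
  rcases eq_or_ne u U with hu | hu
  · subst hu
    rcases eq_or_ne c C with hc | hc
    · subst hc
      have hC2 : c < dp[u].length := by
        have h := hC
        rw [List.getD_eq_getElem?_getD, List.getElem?_eq_getElem hU] at h
        simpa using h
      simp [pvLookup_natCast, List.getD_eq_getElem?_getD, List.getElem?_set, hU, hC2]
    · simp [pvLookup_natCast, List.getD_eq_getElem?_getD, List.getElem?_set, hU, hc,
        Ne.symm hc]
  · simp [pvLookup_natCast, List.getD_eq_getElem?_getD, List.getElem?_set, hu, Ne.symm hu]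

lemma pvSolveA_correct (n goal k m : Int) (hm : 0 < m) (hgoal : goal ≤ 101) :
    ∀ (fuel : Nat) (used currL : Int) (dp : List (List Int)),
      0 ≤ used → used ≤ currL → currL ≤ goal →
      (goal - currL).toNat ≤ fuel → pvValid n goal k m dp →
      (pvSolveA n goal k m fuel used currL dp).1 = pvG n k m (goal - currL).toNat used ∧
      pvValid n goal k m (pvSolveA n goal k m fuel used currL dp).2 := by
  intro fuel
  induction fuel with
  | zero =>
    intro used currL dp hu0 huc hle hf hv
    have : currL = goal := by omega
    subst this
    refine ⟨by simp [pvSolveA, pvG], ?_⟩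
    simpa [pvSolveA] using hv
  | succ fuel ih =>
    intro used currL dp hu0 huc hle hf hv
    by_cases hg : currL = goal
    · subst hg
      refine ⟨by simp [pvSolveA, pvG], ?_⟩
      simpa [pvSolveA] using hv
    · have hlt : currL < goal := lt_of_le_of_ne hle hg
      obtain ⟨hlen, hrows, hval⟩ := hv
      by_cases hd : pvLookup dp used currL = -1
      · -- cache miss: recurse, then store
        have h1 := ih used (currL + 1) dp hu0 (by omega) (by omega) (by omega)
          ⟨hlen, hrows, hval⟩
        set r1 := pvSolveA n goal k m fuel used (currL + 1) dp with hr1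
        have h2 := ih (used + 1) (currL + 1) r1.2 (by omega) (by omega) (by omega)
          (by omega) h1.2
        set r2 := pvSolveA n goal k m fuel (used + 1) (currL + 1) r1.2 with hr2
        obtain ⟨hlen2, hrows2, hval2⟩ := h2.2
        have hrn : (goal - currL).toNat = (goal - (currL + 1)).toNat + 1 := by omega
        have hstored :
            PySem.Int.mod (PySem.Int.mod
              (PySem.Int.mod (r1.1 * max 0 (used - k)) m +
               PySem.Int.mod (r2.1 * (n - used)) m) m) m
              = pvG n k m (goal - currL).toNat used := by
          rw [h1.1, h2.1, hrn]
          rw [pvMod_idem _ _ hm]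
          rfl
        have hc0 : (0 : Int) ≤ currL := le_trans hu0 huc
        have hUlt : used.toNat < r2.2.length := by omega
        have hClt : currL.toNat < (r2.2.getD used.toNat []).length := by
          have : r2.2.getD used.toNat [] ∈ r2.2 := by
            rw [List.getD_eq_getElem?_getD, List.getElem?_eq_getElem hUlt]
            exact List.getElem_mem hUlt
          rw [hrows2 _ this]; omega
        -- the write, in Nat-index form
        have hdp' : ∀ v : Int, PySem.List.pySetD r2.2 used
            (PySem.List.pySetD (PySem.List.pyGetD r2.2 used []) currL v)
            = r2.2.set used.toNat ((r2.2.getD used.toNat []).set currL.toNat v) := by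
          intro v
          simp [PySem.List.pySetD_of_nonneg, PySem.List.pyGetD_of_nonneg, hu0, hc0]
        have hlook : ∀ v : Int,
            pvLookup (r2.2.set used.toNat ((r2.2.getD used.toNat []).set currL.toNat v))
              used currL = v := by
          intro v
          have hcl : pvLookup
              (r2.2.set used.toNat ((r2.2.getD used.toNat []).set currL.toNat v))
              used currL
              = pvLookup
              (r2.2.set used.toNat ((r2.2.getD used.toNat []).set currL.toNat v))
              ((used.toNat : Nat) : Int) ((currL.toNat : Nat) : Int) := by
            congr 1 <;> omega
          rw [hcl, ← pvLookup_natCast']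
          rw [pvLookup_set _ _ _ _ _ _ hUlt hClt]
          simp
        constructor
        · show (pvSolveA n goal k m (fuel + 1) used currL dp).1 = _
          simp only [pvSolveA, if_neg hg, hd, ne_eq, not_true_eq_false, if_neg,
            not_false_eq_true]
          rw [← hr1, ← hr2, hdp', hlook]
          exact hstored
        · show pvValid n goal k m (pvSolveA n goal k m (fuel + 1) used currL dp).2
          simp only [pvSolveA, if_neg hg, hd, ne_eq, not_true_eq_false, if_neg,
            not_false_eq_true]
          rw [← hr1, ← hr2, hdp']
          refine ⟨by simpa using hlen2, ?_, ?_⟩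
          · intro row hrow
            rcases List.mem_or_eq_of_mem_set hrow with h | h
            · exact hrows2 _ h
            · subst h
              rw [List.length_set]
              have : r2.2.getD used.toNat [] ∈ r2.2 := by
                rw [List.getD_eq_getElem?_getD, List.getElem?_eq_getElem hUlt]
                exact List.getElem_mem hUlt
              exact hrows2 _ this
          · intro u c hc
            rw [pvLookup_set _ _ _ _ _ _ hUlt hClt]
            by_cases he : u = used.toNat ∧ c = currL.toNat
            · right
              rw [if_pos he]
              obtain ⟨h1', h2'⟩ := he
              subst h1'; subst h2'
              have e1 : (goal - ((currL.toNat : Nat) : Int)).toNat = (goal - currL).toNat := by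
                omega
              have e2 : ((used.toNat : Nat) : Int) = used := by omega
              rw [e1, e2]
              exact hstored
            · rw [if_neg he]
              exact hval2 u c hc
      · -- cache hit
        have := hval used.toNat currL.toNat (by omega)
        have hcast : pvLookup dp used.toNat currL.toNat = pvLookup dp used currL := by
          congr 1 <;> omega
        have hval' : pvLookup dp used currL = pvG n k m (goal - currL).toNat used := by
          rw [← hcast]
          rcases this with h | h
          · exact absurd (hcast ▸ h) hd
          · rw [h]
            congr 2 <;> omega
        constructor
        · simp only [pvSolveA, if_neg hg, ne_eq, hd, not_false_eq_true, ite_true]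
          exact hval'
        · simp only [pvSolveA, if_neg hg, ne_eq, hd, not_false_eq_true, ite_true]
          exact ⟨hlen, hrows, hval⟩


-- one bottom-up level of B equals one step of the recurrence
lemma pvRow_step (n goal k m : Int) (hm : 0 < m) (j : Nat) (_hj : (j : Int) < goal) :
    ((PySem.List.pyRange 0 (goal - 1 - j + 1) 1).map
      (fun u => PySem.Int.mod
        (PySem.List.pyGetD ((PySem.List.pyRange 0 (goal - j + 1) 1).map (pvG n k m j)) u 0 * max 0 (u - k) +
         PySem.List.pyGetD ((PySem.List.pyRange 0 (goal - j + 1) 1).map (pvG n k m j)) (u + 1) 0 * (n - u)) m))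
      = (PySem.List.pyRange 0 (goal - (j + 1) + 1) 1).map (pvG n k m (j + 1)) := by
  have hr : goal - ((j : Int) + 1) + 1 = goal - 1 - (j : Int) + 1 := by ring
  rw [hr]
  apply List.map_congr_left
  intro u hu
  rw [PySem.List.mem_pyRange_one] at hu
  rw [PySem.List.pyGetD_map_pyRange_of_nonneg _ _ _ _ (by omega) (by omega),
      PySem.List.pyGetD_map_pyRange_of_nonneg _ _ _ _ (by omega) (by omega)]
  exact pvG_step n k m hm j u

-- the fold over the countdown range computes the rows bottom-up
lemma pvFold_rows (n goal k m : Int) (hm : 0 < m) (_hg : 0 ≤ goal) :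
    ∀ j : Nat, (j : Int) ≤ goal →
      ((List.range j).map (fun (i : Nat) => goal - 1 - (i : Int))).foldl
        (fun row L => (PySem.List.pyRange 0 (L + 1) 1).map
          (fun u => PySem.Int.mod
            (PySem.List.pyGetD row u 0 * max 0 (u - k) + PySem.List.pyGetD row (u + 1) 0 * (n - u)) m))
        ((PySem.List.pyRange 0 (goal + 1) 1).map (fun u => if u = n then (1 : Int) else 0))
      = (PySem.List.pyRange 0 (goal - j + 1) 1).map (pvG n k m j) := by
  intro j
  induction j with
  | zero =>
    intro _
    simp only [List.range_zero, List.map_nil, List.foldl_nil, Nat.cast_zero, sub_zero]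
    apply List.map_congr_left
    intro u _
    rfl
  | succ j ih =>
    intro hj
    have hj' : (j : Int) < goal := by push_cast at hj ⊢; omega
    rw [List.range_succ, List.map_append, List.foldl_append, ih (le_of_lt hj')]
    simp only [List.map_cons, List.map_nil, List.foldl_cons, List.foldl_nil]
    exact pvRow_step n goal k m hm j hj'

lemma pvCountdown_eq (goal : Int) :
    PySem.List.pyRange (goal - 1) (-1) (-1)
      = (List.range goal.toNat).map (fun (i : Nat) => goal - 1 - (i : Int)) := by
  rw [PySem.List.pyRange_neg_one]
  have : (goal - 1 - (-1)).toNat = goal.toNat := by omega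
  rw [this]

-- ===== VERDICT (by name: the statement is the Claim_ definition above) =====
theorem numMusicPlaylists_spec : Claim_equal_numMusicPlaylists := by
  intro n goal k _ hpre
  obtain ⟨hg1, hg2⟩ := hpre
  have hg0 : 0 ≤ goal := by omega
  show numMusicPlaylists n goal k = numMusicPlaylists_alt n goal k
  have hm : (0 : Int) < 10 ^ 9 + 7 := by norm_num
  -- A computes pvG goal.toNat 0
  have hA : numMusicPlaylists n goal k = pvG n k (10 ^ 9 + 7) (goal - 0).toNat 0 := by
    have hv : pvValid n goal k (10 ^ 9 + 7) (List.replicate 101 (List.replicate 101 (-1))) := by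
      refine ⟨by simp, by intro row hrow; simp_all [List.eq_of_mem_replicate hrow], ?_⟩
      intro u c _
      left
      rw [pvLookup_natCast]
      rw [List.getD_eq_getElem?_getD (a := ([] : List Int)), List.getElem?_replicate]
      by_cases hu : u < 101
      · rw [if_pos hu, Option.getD_some, List.getD_eq_getElem?_getD,
            List.getElem?_replicate]
        by_cases hcb : c < 101
        · rw [if_pos hcb, Option.getD_some]
        · rw [if_neg hcb, Option.getD_none]
      · rw [if_neg hu, Option.getD_none, List.getD_nil]
    exact (pvSolveA_correct n goal k (10 ^ 9 + 7) hm hg2 goal.toNat 0 0 _ le_rfl le_rfl hg0 (by omega) hv).1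
  -- B computes the same
  have hB : numMusicPlaylists_alt n goal k = pvG n k (10 ^ 9 + 7) goal.toNat 0 := by
    show PySem.List.pyGetD _ 0 0 = _
    rw [pvCountdown_eq goal,
        pvFold_rows n goal k (10 ^ 9 + 7) hm hg0 goal.toNat (by omega)]
    have h1 : goal - (goal.toNat : Int) + 1 = 1 := by omega
    rw [h1]
    have h2 : PySem.List.pyRange 0 1 1 = [0] := by decide
    rw [h2]
    simp [PySem.List.pyGetD_zero_cons]
  rw [hA, hB]
  congr 1
  omega
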